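-- pv_equiv track=rewrite | github.com/Wulfic/Cicada3301 | LiberPrimus/pages/page_00/analysis/parable_comparison.py | gp_to_idx
-- ===== SOURCE A (Python) =====
-- GP = ['F','U','TH','O','R','C','K','G','W','H','N','I','J','EO','P','X','S','T','B','E','M','L','ING','OE','D','A','AE','Y','EA']
--
-- def gp_to_idx(text):
--     """Convert GP text to indices"""
--     indices = []
--     i = 0
--     while i < len(text):
--         found = False
--         for length in [3, 2, 1]:  # Try longest first
--             if i + length <= len(text):
--                 chunk = text[i:i+length]
--                 if chunk in GP:
--                     indices.append(GP.index(chunk))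
--                     i += length
--                     found = True
--                     break
--         if not found:
--             i += 1  # Skip unknown
--     return indices
-- ===== SOURCE B (Python) =====
-- GP = ['F','U','TH','O','R','C','K','G','W','H','N','I','J','EO','P','X','S','T','B','E','M','L','ING','OE','D','A','AE','Y','EA']
--
-- # Tables built once: the 2-letter and 1-letter tokens keyed directly; 'ING' is the
-- # only 3-letter token, so it is tested with a single startswith.
-- TWO = {t: i for i, t in enumerate(GP) if len(t) == 2}
-- ONE = {t: i for i, t in enumerate(GP) if len(t) == 1}
--
-- def gp_to_idx(text):
--     """Convert GP text to indices"""
--     out = []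
--     s = text
--     while s:
--         if s.startswith('ING'):
--             out.append(22)
--             s = s[3:]
--         else:
--             k = TWO.get(s[:2])
--             if k is not None:
--                 out.append(k)
--                 s = s[2:]
--             else:
--                 k = ONE.get(s[:1])
--                 if k is not None:
--                     out.append(k)
--                 s = s[1:]
--     return out
-- ===== Notes on version B (the rewrite author's own statement) =====
-- stated objective: alternative
-- what changed: A rescans the 29-entry GP list twice per position (membership test, then .index) for each chunk length 3/2/1; B builds token-to-index dict tables once, tests the single 3-letter token with one startswith and resolves 2- and 1-letter tokens by one dict lookup each, consuming the string suffix by suffix.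
import Mathlib
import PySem

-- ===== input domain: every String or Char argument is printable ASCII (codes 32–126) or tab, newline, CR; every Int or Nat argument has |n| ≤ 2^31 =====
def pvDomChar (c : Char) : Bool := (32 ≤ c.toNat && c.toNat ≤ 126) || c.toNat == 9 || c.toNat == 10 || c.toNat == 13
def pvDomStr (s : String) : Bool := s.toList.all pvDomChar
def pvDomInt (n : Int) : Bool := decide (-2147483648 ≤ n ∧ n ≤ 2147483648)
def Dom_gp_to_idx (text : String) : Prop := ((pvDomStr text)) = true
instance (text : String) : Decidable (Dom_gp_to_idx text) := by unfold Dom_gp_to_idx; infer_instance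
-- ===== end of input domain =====

-- B replaces A's per-position 3/2/1 slice-and-scan of GP (membership test plus a second
-- .index scan) by lookup tables built once and a suffix-consuming loop (objective: alternative).

-- ===== PORT A =====
-- GP, the Gematria Primus token list (strings as char lists)
def gpGP : List (List Char) :=
  [['F'],['U'],['T','H'],['O'],['R'],['C'],['K'],['G'],['W'],['H'],['N'],['I'],['J'],
   ['E','O'],['P'],['X'],['S'],['T'],['B'],['E'],['M'],['L'],['I','N','G'],['O','E'],
   ['D'],['A'],['A','E'],['Y'],['E','A']]

-- the while-loop of A: index i, try chunk lengths 3, 2, 1 (longest first), else skip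
def gpA_loop (cs : List Char) (i : Nat) (acc : List Int) : List Int :=
  if h : i < cs.length then
    if i + 3 ≤ cs.length ∧ PySem.List.slice cs (some (i : Int)) (some ((i + 3 : Nat) : Int)) ∈ gpGP then
      gpA_loop cs (i + 3)
        (acc ++ [(((PySem.List.index? gpGP (PySem.List.slice cs (some (i : Int)) (some ((i + 3 : Nat) : Int)))).getD 0 : Nat) : Int)])
    else if i + 2 ≤ cs.length ∧ PySem.List.slice cs (some (i : Int)) (some ((i + 2 : Nat) : Int)) ∈ gpGP then
      gpA_loop cs (i + 2)
        (acc ++ [(((PySem.List.index? gpGP (PySem.List.slice cs (some (i : Int)) (some ((i + 2 : Nat) : Int)))).getD 0 : Nat) : Int)])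
    else if i + 1 ≤ cs.length ∧ PySem.List.slice cs (some (i : Int)) (some ((i + 1 : Nat) : Int)) ∈ gpGP then
      gpA_loop cs (i + 1)
        (acc ++ [(((PySem.List.index? gpGP (PySem.List.slice cs (some (i : Int)) (some ((i + 1 : Nat) : Int)))).getD 0 : Nat) : Int)])
    else
      gpA_loop cs (i + 1) acc
  else acc
termination_by cs.length - i
decreasing_by all_goals omega

def gp_to_idx (text : String) : List Int := gpA_loop text.toList 0 []

-- ===== PORT B =====
-- TWO = {t: i for i, t in enumerate(GP) if len(t) == 2}
def gpTWO : PySem.Dict (List Char) Int :=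
  (PySem.List.enumerate gpGP 0).foldl
    (fun d p => if p.2.length = 2 then PySem.Dict.insert d p.2 p.1 else d) PySem.Dict.empty

-- ONE = {t: i for i, t in enumerate(GP) if len(t) == 1}
def gpONE : PySem.Dict (List Char) Int :=
  (PySem.List.enumerate gpGP 0).foldl
    (fun d p => if p.2.length = 1 then PySem.Dict.insert d p.2 p.1 else d) PySem.Dict.empty

-- the while-loop of B: consume the suffix s; 'ING' via startswith, then the two tables
def gpB_loop : List Char → List Int → List Int
  | [], acc => acc
  | c :: t, acc =>
    if PySem.Chars.startswith (c :: t) ['I','N','G'] then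
      gpB_loop (t.drop 2) (acc ++ [22])          -- s = s[3:]
    else
      match PySem.Dict.get? gpTWO ((c :: t).take 2) with
      | some k => gpB_loop (t.drop 1) (acc ++ [k])   -- s = s[2:]
      | none =>
        match PySem.Dict.get? gpONE [c] with         -- s[:1]
        | some k => gpB_loop t (acc ++ [k])          -- s = s[1:]
        | none => gpB_loop t acc
termination_by s _ => s.length
decreasing_by all_goals simp

def gp_to_idx_alt (text : String) : List Int := gpB_loop text.toList []

-- ===== PRECONDITION & SPEC =====
def Spec_gp_to_idx (text : String) (out : List Int) : Prop := out = gp_to_idx_alt text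
instance (text : String) (out : List Int) : Decidable (Spec_gp_to_idx text out) := by unfold Spec_gp_to_idx; infer_instance

-- ===== CLAIM (what is proved, stated in full; the proofs are below) =====
def Claim_equal_gp_to_idx : Prop := ∀ (text : String), Dom_gp_to_idx text → Spec_gp_to_idx text (gp_to_idx text)

-- ===== LEMMAS AND PROOFS =====

theorem gpMem3 : ∀ l ∈ gpGP, l.length = 3 → l = ['I','N','G'] := by decide

theorem gpMem2 : ∀ l ∈ gpGP, l.length = 2 →
    l = ['T','H'] ∨ l = ['E','O'] ∨ l = ['O','E'] ∨ l = ['A','E'] ∨ l = ['E','A'] := by decide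

-- the two tables, evaluated
theorem gpTWO_eq : gpTWO = PySem.Dict.mk
    [(['T','H'],2),(['E','O'],13),(['O','E'],23),(['A','E'],26),(['E','A'],28)] := by decide

theorem gpONE_eq : gpONE = PySem.Dict.mk
    [(['F'],0),(['U'],1),(['O'],3),(['R'],4),(['C'],5),(['K'],6),(['G'],7),(['W'],8),
     (['H'],9),(['N'],10),(['I'],11),(['J'],12),(['P'],14),(['X'],15),(['S'],16),
     (['T'],17),(['B'],18),(['E'],19),(['M'],20),(['L'],21),(['D'],24),(['A'],25),
     (['Y'],27)] := by decide

theorem gpMem1 : ∀ l ∈ gpGP, l.length = 1 →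
    l = ['F'] ∨ l = ['U'] ∨ l = ['O'] ∨ l = ['R'] ∨ l = ['C'] ∨ l = ['K'] ∨ l = ['G'] ∨ l = ['W'] ∨ l = ['H'] ∨ l = ['N'] ∨ l = ['I'] ∨ l = ['J'] ∨ l = ['P'] ∨ l = ['X'] ∨ l = ['S'] ∨ l = ['T'] ∨ l = ['B'] ∨ l = ['E'] ∨ l = ['M'] ∨ l = ['L'] ∨ l = ['D'] ∨ l = ['A'] ∨ l = ['Y'] := by decide

-- the lookup tables answer exactly "this chunk is a GP token of that length", with its GP index
theorem gpTWO_get (l : List Char) :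
    PySem.Dict.get? gpTWO l =
      if l.length = 2 ∧ l ∈ gpGP then some (((PySem.List.index? gpGP l).getD 0 : Nat) : Int)
      else none := by
  by_cases h1 : l = ['T','H']; · subst h1; decide
  by_cases h2 : l = ['E','O']; · subst h2; decide
  by_cases h3 : l = ['O','E']; · subst h3; decide
  by_cases h4 : l = ['A','E']; · subst h4; decide
  by_cases h5 : l = ['E','A']; · subst h5; decide
  rw [if_neg (by rintro ⟨hl, hm⟩; rcases gpMem2 l hm hl with h|h|h|h|h <;> simp_all)]
  rw [gpTWO_eq]
  simp [Ne.symm h1, Ne.symm h2, Ne.symm h3, Ne.symm h4, Ne.symm h5, PySem.Dict.get?]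

theorem gpONE_get (l : List Char) :
    PySem.Dict.get? gpONE l =
      if l.length = 1 ∧ l ∈ gpGP then some (((PySem.List.index? gpGP l).getD 0 : Nat) : Int)
      else none := by
  by_cases g0 : l = ['F']; · subst g0; decide
  by_cases g1 : l = ['U']; · subst g1; decide
  by_cases g2 : l = ['O']; · subst g2; decide
  by_cases g3 : l = ['R']; · subst g3; decide
  by_cases g4 : l = ['C']; · subst g4; decide
  by_cases g5 : l = ['K']; · subst g5; decide
  by_cases g6 : l = ['G']; · subst g6; decide
  by_cases g7 : l = ['W']; · subst g7; decide
  by_cases g8 : l = ['H']; · subst g8; decide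
  by_cases g9 : l = ['N']; · subst g9; decide
  by_cases g10 : l = ['I']; · subst g10; decide
  by_cases g11 : l = ['J']; · subst g11; decide
  by_cases g12 : l = ['P']; · subst g12; decide
  by_cases g13 : l = ['X']; · subst g13; decide
  by_cases g14 : l = ['S']; · subst g14; decide
  by_cases g15 : l = ['T']; · subst g15; decide
  by_cases g16 : l = ['B']; · subst g16; decide
  by_cases g17 : l = ['E']; · subst g17; decide
  by_cases g18 : l = ['M']; · subst g18; decide
  by_cases g19 : l = ['L']; · subst g19; decide
  by_cases g20 : l = ['D']; · subst g20; decide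
  by_cases g21 : l = ['A']; · subst g21; decide
  by_cases g22 : l = ['Y']; · subst g22; decide
  rw [if_neg (by rintro ⟨hl, hm⟩; rcases gpMem1 l hm hl with h|h|h|h|h|h|h|h|h|h|h|h|h|h|h|h|h|h|h|h|h|h|h <;> simp_all)]
  rw [gpONE_eq]
  simp [Ne.symm g0, Ne.symm g1, Ne.symm g2, Ne.symm g3, Ne.symm g4, Ne.symm g5, Ne.symm g6,
    Ne.symm g7, Ne.symm g8, Ne.symm g9, Ne.symm g10, Ne.symm g11, Ne.symm g12, Ne.symm g13,
    Ne.symm g14, Ne.symm g15, Ne.symm g16, Ne.symm g17, Ne.symm g18, Ne.symm g19, Ne.symm g20,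
    Ne.symm g21, Ne.symm g22, PySem.Dict.get?]

-- the two loops agree: A at index i equals B on the suffix from i
theorem gp_main (n : Nat) : ∀ (cs : List Char) (i : Nat) (acc : List Int),
    cs.length ≤ i + n → gpA_loop cs i acc = gpB_loop (cs.drop i) acc := by
  induction n with
  | zero =>
    intro cs i acc h
    rw [gpA_loop, dif_neg (by omega), List.drop_eq_nil_of_le (by omega), gpB_loop]
  | succ n ih =>
    intro cs i acc h
    by_cases hi : i < cs.length
    · obtain ⟨c, t, hs⟩ := List.exists_cons_of_ne_nil
        (show cs.drop i ≠ [] from by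
          intro hnil
          have := congrArg List.length hnil
          simp at this; omega)
      have hlen : t.length + 1 = cs.length - i := by
        have := congrArg List.length hs
        simpa using this.symm
      have hsl : ∀ L : Nat,
          PySem.List.slice cs (some (i : Int)) (some ((i + L : Nat) : Int)) = (c :: t).take L := by
        intro L
        rw [PySem.List.slice_natCast, hs]
        congr 1; omega
      have hdrop : ∀ L : Nat, (c :: t).drop L = cs.drop (i + L) := by
        intro L
        rw [← hs, List.drop_drop]
      rw [gpA_loop, dif_pos hi, hsl 3, hsl 2, hsl 1, hs, gpB_loop]
      by_cases hING : (c :: t).take 3 = ['I','N','G']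
      · have h3 : 3 ≤ t.length + 1 := by
          have := congrArg List.length hING
          simp [List.length_take] at this; omega
        have hsw : PySem.Chars.startswith (c :: t) ['I','N','G'] = true := by
          rw [PySem.Chars.startswith_iff, ← hING]; exact List.take_prefix 3 _
        have hd3 : t.drop 2 = cs.drop (i + 3) := hdrop 3
        have hv : (((PySem.List.index? gpGP ['I','N','G']).getD 0 : Nat) : Int) = 22 := by decide
        rw [if_pos ⟨by omega, by rw [hING]; decide⟩, hING, if_pos hsw, hv, hd3]
        exact ih cs (i + 3) _ (by omega)
      · have hsw : ¬ PySem.Chars.startswith (c :: t) ['I','N','G'] = true := by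
          intro hb
          exact hING ((List.prefix_iff_eq_take.mp ((PySem.Chars.startswith_iff _ _).mp hb)).symm)
        have hA3 : ¬(i + 3 ≤ cs.length ∧ (c :: t).take 3 ∈ gpGP) := by
          rintro ⟨hle, hm⟩
          exact hING (gpMem3 _ hm (by simp [List.length_take]; omega))
        rw [if_neg hA3, if_neg hsw, gpTWO_get]
        by_cases h2 : 2 ≤ t.length + 1 ∧ (c :: t).take 2 ∈ gpGP
        · have hl2 : ((c :: t).take 2).length = 2 := by simp [List.length_take]; omega
          have hd2 : t.drop 1 = cs.drop (i + 2) := hdrop 2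
          rw [if_pos (show i + 2 ≤ cs.length ∧ (c :: t).take 2 ∈ gpGP from ⟨by omega, h2.2⟩),
              if_pos (show ((c :: t).take 2).length = 2 ∧ (c :: t).take 2 ∈ gpGP from ⟨hl2, h2.2⟩),
              hd2]
          exact ih cs (i + 2) _ (by omega)
        · have hA2 : ¬(i + 2 ≤ cs.length ∧ (c :: t).take 2 ∈ gpGP) := by
            rintro ⟨hle, hm⟩
            exact h2 ⟨by omega, hm⟩
          have hB2 : ¬(((c :: t).take 2).length = 2 ∧ (c :: t).take 2 ∈ gpGP) := by
            rintro ⟨hl2, hm⟩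
            exact h2 ⟨by simp [List.length_take] at hl2; omega, hm⟩
          have ht1 : (c :: t).take 1 = [c] := rfl
          have hdt : t = cs.drop (i + 1) := hdrop 1
          rw [if_neg hA2, if_neg hB2, gpONE_get, ht1]
          by_cases h1 : [c] ∈ gpGP
          · rw [if_pos (show i + 1 ≤ cs.length ∧ [c] ∈ gpGP from ⟨by omega, h1⟩),
                if_pos (show [c].length = 1 ∧ [c] ∈ gpGP from ⟨rfl, h1⟩), hdt]
            exact ih cs (i + 1) _ (by omega)
          · rw [if_neg (show ¬(i + 1 ≤ cs.length ∧ [c] ∈ gpGP) from fun hh => h1 hh.2),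
                if_neg (show ¬([c].length = 1 ∧ [c] ∈ gpGP) from fun hh => h1 hh.2), hdt]
            exact ih cs (i + 1) _ (by omega)
    · rw [gpA_loop, dif_neg hi, List.drop_eq_nil_of_le (by omega), gpB_loop]

-- ===== VERDICT (by name: the statement is the Claim_ definition above) =====
theorem gp_to_idx_spec : Claim_equal_gp_to_idx := by
  intro text _
  unfold Spec_gp_to_idx gp_to_idx gp_to_idx_alt
  simpa using gp_main text.toList.length text.toList 0 [] (by omega)
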